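-- pv_equiv track=rewrite | github.com/sun-hainan/Python | 数据库算法/query_plan.py | enumerate_plans
-- ===== SOURCE A (Python) =====
-- from typing import List, Dict, Tuple, Optional, Set, Callable
--
-- def enumerate_plans(tables: List[str], max_depth: int = 3) -> List[Dict]:
--
--     """
--
--     枚举所有可能的查询计划
--
--
--
--     Args:
--
--         tables: 表列表
--
--         max_depth: 最大深度
--
--
--
--     Returns:
--
--         计划列表
--
--     """
--
--     plans = []
--
--
--
--     def enumerate_rec(current_tables: List[str], depth: int, path: List[str]):
--
--         if depth >= max_depth or len(current_tables) == 1: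
--
--             plans.append(path.copy())
--
--             return
--
--
--
--         for i in range(len(current_tables)):
--
--             for j in range(i + 1, len(current_tables)):
--
--                 left = current_tables[i]
--
--                 right = current_tables[j]
--
--
--
--                 # 尝试不同的连接顺序
--
--                 remaining = [t for k, t in enumerate(current_tables)
--
--                            if k != i and k != j]
--
--
--
--                 for method in ["hash", "nested_loop", "sort_merge"]:
--
--                     new_path = path + [f"{method}({left},{right})"]
--
--                     enumerate_rec(remaining + [f"({left}x{right})"], depth + 1, new_path)
--
--
--
--     enumerate_rec(tables, 0, [])
--
--     return plans
-- ===== SOURCE B (Python) =====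
-- from typing import List, Dict
--
--
-- def enumerate_plans(tables: List[str], max_depth: int = 3) -> List[Dict]:
--     """Iterative level-by-level expansion instead of recursion: every join step
--     consumes exactly one table, so all plans complete at the same depth
--     min(max_depth, len(tables)-1); expanding a frontier of (tables, path)
--     states level by level yields the plans in the same order as the DFS."""
--     frontier = [(list(tables), [])]
--     depth = 0
--     while frontier and depth < max_depth and len(tables) - depth != 1:
--         nxt = []
--         for ct, path in frontier:
--             for i in range(len(ct)):
--                 for j in range(i + 1, len(ct)):
--                     left, right = ct[i], ct[j]
--                     remaining = [t for k, t in enumerate(ct) if k != i and k != j]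
--                     for m in ("hash", "nested_loop", "sort_merge"):
--                         nxt.append((remaining + [f"({left}x{right})"],
--                                     path + [f"{m}({left},{right})"]))
--         frontier = nxt
--         depth += 1
--     return [path for _, path in frontier]
-- ===== Notes on version B (the rewrite author's own statement) =====
-- stated objective: alternative
-- what changed: Replaces A's recursive DFS with a shared plans list by an iterative level-by-level worklist: a frontier of (tables, path) states is expanded in a while loop (every join consumes exactly one table, so all plans finish at the same depth and level order equals DFS order), the final frontier's paths being the answer.
import Mathlib
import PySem

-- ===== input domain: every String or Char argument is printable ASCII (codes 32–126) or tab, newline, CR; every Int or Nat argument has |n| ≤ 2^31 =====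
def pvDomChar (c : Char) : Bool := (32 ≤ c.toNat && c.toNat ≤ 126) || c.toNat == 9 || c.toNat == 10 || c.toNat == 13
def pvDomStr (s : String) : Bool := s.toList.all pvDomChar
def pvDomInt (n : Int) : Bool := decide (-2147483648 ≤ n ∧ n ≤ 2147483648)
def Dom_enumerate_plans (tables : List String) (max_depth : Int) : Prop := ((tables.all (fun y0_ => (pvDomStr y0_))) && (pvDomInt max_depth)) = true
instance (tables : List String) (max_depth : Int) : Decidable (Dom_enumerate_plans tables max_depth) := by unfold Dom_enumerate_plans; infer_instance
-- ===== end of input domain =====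

-- B replaces A's recursive DFS by an iterative level-by-level worklist expansion
-- (every join consumes one table, so all plans finish at the same depth and the
-- level order equals the DFS order); objective: alternative decomposition.

-- ===== PORT A =====
-- The recursion consumes one table per level (remaining ++ [merged] has length n-1),
-- so fuel = tables.length bounds the depth; fuel is a termination device only and,
-- starting from tables.length, is never exhausted.  Indexing ct[i]/ct[j] is always
-- in range (0 ≤ i < j < len), ported as pyGetD with default "" (exact here).
def pvMethodsA : List String := ["hash", "nested_loop", "sort_merge"]

def pvEnumRecA (max_depth : Int) : Nat → List String → Int → List String → List (List String)
  | fuel, current_tables, depth, path =>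
    if depth ≥ max_depth ∨ current_tables.length = 1 then [path]
    else
      match fuel with
      | 0 => []
      | fuel + 1 =>
        (PySem.List.pyRange 0 current_tables.length 1).foldl (fun plans i =>
          (PySem.List.pyRange (i + 1) current_tables.length 1).foldl (fun plans j =>
            let left := PySem.List.pyGetD current_tables i ""
            let right := PySem.List.pyGetD current_tables j ""
            let remaining := ((PySem.List.enumerate current_tables).filter
              (fun kt => kt.1 != i && kt.1 != j)).map (·.2)
            pvMethodsA.foldl (fun plans method =>
              let new_path := path ++ [method ++ "(" ++ left ++ "," ++ right ++ ")"]
              plans ++ pvEnumRecA max_depth fuel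
                (remaining ++ ["(" ++ left ++ "x" ++ right ++ ")"]) (depth + 1) new_path)
              plans) plans) []

def enumerate_plans (tables : List String) (max_depth : Int) : List (List String) :=
  pvEnumRecA max_depth tables.length tables 0 []

-- ===== PORT B =====
-- One level of Source B's worklist: all successors of a single (ct, path) state,
-- in the i / j / method order of the Python loops.
def pvStepB (ct : List String) (path : List String) : List (List String × List String) :=
  (PySem.List.pyRange 0 ct.length 1).flatMap (fun i =>
    (PySem.List.pyRange (i + 1) ct.length 1).flatMap (fun j =>
      let left := PySem.List.pyGetD ct i ""
      let right := PySem.List.pyGetD ct j ""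
      let remaining := ((PySem.List.enumerate ct).filter
        (fun kt => kt.1 != i && kt.1 != j)).map (·.2)
      ["hash", "nested_loop", "sort_merge"].map (fun m =>
        (remaining ++ ["(" ++ left ++ "x" ++ right ++ ")"],
         path ++ [m ++ "(" ++ left ++ "," ++ right ++ ")"]))))

-- Source B's while loop; fuel = tables.length + 1 only bounds the iterations and is
-- never exhausted (the loop stops at depth = n-1 at the latest, or with an empty
-- frontier after one round when n = 0).
def pvLoopB (max_depth : Int) (n : Nat) : Nat → List (List String × List String) → Int → List (List String)
  | 0, frontier, _ => frontier.map (·.2)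
  | fuel + 1, frontier, depth =>
    if frontier ≠ [] ∧ depth < max_depth ∧ (n : Int) - depth ≠ 1 then
      pvLoopB max_depth n fuel (frontier.flatMap (fun p => pvStepB p.1 p.2)) (depth + 1)
    else frontier.map (·.2)

def enumerate_plans_alt (tables : List String) (max_depth : Int) : List (List String) :=
  pvLoopB max_depth tables.length (tables.length + 1) [(tables, [])] 0

-- ===== PRECONDITION & SPEC =====
def Spec_enumerate_plans (tables : List String) (max_depth : Int) (out : List (List String)) : Prop := out = enumerate_plans_alt tables max_depth
instance (tables : List String) (max_depth : Int) (out : List (List String)) : Decidable (Spec_enumerate_plans tables max_depth out) := by unfold Spec_enumerate_plans; infer_instance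

-- ===== CLAIM =====
def Claim_equal_enumerate_plans : Prop := ∀ (tables : List String) (max_depth : Int), Dom_enumerate_plans tables max_depth → Spec_enumerate_plans tables max_depth (enumerate_plans tables max_depth)

-- ===== LEMMAS AND PROOFS =====

-- removing two distinct in-range indices leaves length - 2 elements
theorem pv_len_remaining (ct : List String) (i j : Int) (hij : i < j)
    (h0 : 0 ≤ i) (hj : j < ct.length) :
    ((((PySem.List.enumerate ct).filter (fun kt => kt.1 != i && kt.1 != j)).map (·.2)).length)
      = ct.length - 2 := by
  rw [List.length_map]
  have hm : ((PySem.List.enumerate ct).filter (fun kt => kt.1 != i && kt.1 != j)).length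
      = (((PySem.List.enumerate ct).map (·.1)).filter (fun k => k != i && k != j)).length := by
    simp [← List.countP_eq_length_filter, List.countP_map, Function.comp_def]
  rw [hm, PySem.List.map_fst_enumerate]
  have hsplit : PySem.List.pyRange 0 (0 + (ct.length : Int)) 1
      = PySem.List.pyRange 0 i 1 ++ [i] ++ PySem.List.pyRange (i+1) j 1 ++ [j]
        ++ PySem.List.pyRange (j+1) (ct.length : Int) 1 := by
    rw [zero_add, PySem.List.pyRange_one_append 0 i (ct.length : Int) h0 (by omega),
        PySem.List.pyRange_one_cons (show i < (ct.length : Int) by omega),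
        PySem.List.pyRange_one_append (i+1) j (ct.length : Int) (by omega) (by omega),
        PySem.List.pyRange_one_cons (show j < (ct.length : Int) by omega)]
    simp
  rw [hsplit]
  have hall : ∀ (a b : Int), (b ≤ i ∨ i + 1 ≤ a ∧ b ≤ j ∨ j + 1 ≤ a) →
      (PySem.List.pyRange a b 1).filter (fun k => k != i && k != j)
        = PySem.List.pyRange a b 1 := by
    intro a b hab
    apply List.filter_eq_self.mpr
    intro k hk
    rw [PySem.List.mem_pyRange_one] at hk
    simp only [bne_iff_ne, ne_eq, Bool.and_eq_true]
    omega
  simp only [List.filter_append]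
  rw [hall 0 i (by omega), hall (i+1) j (by omega), hall (j+1) (ct.length : Int) (by omega)]
  have hfi : (List.filter (fun k => k != i && k != j) [i]) = [] := by simp
  have hfj : (List.filter (fun k => k != i && k != j) [j]) = [] := by simp
  rw [hfi, hfj]
  simp only [List.length_append, PySem.List.length_pyRange_one, List.length_nil]
  omega

-- every successor state has one table fewer
theorem pv_step_length (ct : List String) (path : List String)
    (q : List String × List String) (hq : q ∈ pvStepB ct path) :
    q.1.length = ct.length - 1 := by
  unfold pvStepB at hq
  simp only [List.mem_flatMap, List.mem_map, PySem.List.mem_pyRange_one] at hq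
  obtain ⟨i, ⟨hi0, hilen⟩, j, ⟨hji, hjlen⟩, m, -, rfl⟩ := hq
  simp only [List.length_append, List.length_cons, List.length_nil]
  rw [pv_len_remaining ct i j (by omega) hi0 (by omega)]
  omega

-- one unfolding of A's recursion as a flatMap over B's successor states
theorem pv_recA_step (max_depth : Int) (g : Nat) (ct : List String) (depth : Int)
    (path : List String) (hstop : ¬ (depth ≥ max_depth ∨ ct.length = 1)) :
    pvEnumRecA max_depth (g + 1) ct depth path
      = (pvStepB ct path).flatMap (fun q => pvEnumRecA max_depth g q.1 (depth + 1) q.2) := by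
  conv_lhs => rw [pvEnumRecA]
  rw [if_neg hstop]
  unfold pvStepB
  simp only [pvMethodsA, PySem.List.foldl_append_eq_flatMap, List.flatMap_assoc,
    List.flatMap_map, List.nil_append]

theorem pv_flatMap_map2 {α β γ : Type} (l : List (α × β)) (g : α × β → List γ)
    (f : α × β → γ) (h : ∀ p ∈ l, g p = [f p]) : l.flatMap g = l.map f := by
  induction l with
  | nil => simp
  | cons a t ih =>
    simp only [List.flatMap_cons, List.map_cons, h a (by simp),
      ih (fun p hp => h p (by simp [hp])), List.singleton_append]

theorem pv_flatMap_congr {α β : Type} (l : List α) (f g : α → List β)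
    (h : ∀ x ∈ l, f x = g x) : l.flatMap f = l.flatMap g := by
  induction l with
  | nil => simp
  | cons a t ih =>
    simp only [List.flatMap_cons, h a (by simp), ih (fun x hx => h x (by simp [hx]))]

theorem pvLoopB_nil (max_depth : Int) (n : Nat) (fuel : Nat) (depth : Int) :
    pvLoopB max_depth n fuel [] depth = [] := by
  cases fuel <;> simp [pvLoopB]

theorem pv_loop_eq (max_depth : Int) (n : Nat) :
    ∀ (fuelB fuelA : Nat) (frontier : List (List String × List String)) (depth : Int),
      fuelA + 1 ≤ fuelB →
      (n : Int) - depth = (fuelA : Int) →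
      (∀ p ∈ frontier, p.1.length = fuelA) →
      pvLoopB max_depth n fuelB frontier depth
        = frontier.flatMap (fun p => pvEnumRecA max_depth fuelA p.1 depth p.2) := by
  intro fuelB fuelA
  induction fuelA generalizing fuelB with
  | zero =>
    intro frontier depth hf hd hlen
    obtain ⟨f, rfl⟩ : ∃ f, fuelB = f + 1 := ⟨fuelB - 1, by omega⟩
    rw [pvLoopB]
    by_cases hc : frontier ≠ [] ∧ depth < max_depth ∧ (n : Int) - depth ≠ 1
    · rw [if_pos hc]
      have hstep : frontier.flatMap (fun p => pvStepB p.1 p.2) = [] := by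
        apply List.flatMap_eq_nil_iff.mpr
        intro p hp
        have hnil : p.1 = [] := List.eq_nil_of_length_eq_zero (hlen p hp)
        rw [hnil]
        simp [pvStepB, PySem.List.pyRange_one_eq_nil]
      rw [hstep, pvLoopB_nil]
      symm
      apply List.flatMap_eq_nil_iff.mpr
      intro p hp
      rw [pvEnumRecA, if_neg (by
        have := hlen p hp
        push Not
        exact ⟨by omega, by omega⟩)]
    · rw [if_neg hc]
      by_cases hfr : frontier = []
      · subst hfr; simp
      · have hde : max_depth ≤ depth := by
          by_contra hlt
          exact hc ⟨hfr, by omega, by omega⟩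
        apply Eq.symm
        apply pv_flatMap_map2 frontier _ (·.2)
        intro p hp
        rw [pvEnumRecA, if_pos (Or.inl (by omega))]
  | succ g ih =>
    intro frontier depth hf hd hlen
    obtain ⟨f, rfl⟩ : ∃ f, fuelB = f + 1 := ⟨fuelB - 1, by omega⟩
    rw [pvLoopB]
    by_cases hc : frontier ≠ [] ∧ depth < max_depth ∧ (n : Int) - depth ≠ 1
    · rw [if_pos hc]
      have hlen' : ∀ q ∈ frontier.flatMap (fun p => pvStepB p.1 p.2), q.1.length = g := by
        intro q hq
        rw [List.mem_flatMap] at hq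
        obtain ⟨p, hp, hqp⟩ := hq
        rw [pv_step_length p.1 p.2 q hqp, hlen p hp]
        omega
      rw [ih f _ (depth + 1) (by omega) (by push_cast at hd ⊢; omega) hlen',
        List.flatMap_assoc]
      apply pv_flatMap_congr
      intro p hp
      exact (pv_recA_step max_depth g p.1 depth p.2 (by
        have h1 := hlen p hp
        have h2 := hc.2.1
        have h3 := hc.2.2
        push Not
        exact ⟨by omega, by omega⟩)).symm
    · rw [if_neg hc]
      by_cases hfr : frontier = []
      · subst hfr; simp
      · apply Eq.symm
        apply pv_flatMap_map2 frontier _ (·.2)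
        intro p hp
        rw [pvEnumRecA]
        by_cases hde : max_depth ≤ depth
        · rw [if_pos (Or.inl (by omega))]
        · have h1 : (n : Int) - depth = 1 := by
            by_contra hne
            exact hc ⟨hfr, by omega, hne⟩
          rw [if_pos (Or.inr (by rw [hlen p hp]; omega))]

-- ===== VERDICT =====
theorem enumerate_plans_spec : Claim_equal_enumerate_plans := by
  intro tables max_depth _
  unfold Spec_enumerate_plans enumerate_plans enumerate_plans_alt
  rw [pv_loop_eq max_depth tables.length (tables.length + 1) tables.length
        [(tables, [])] 0 (le_refl _) (by simp) (by simp)]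
  simp
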